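-- pv_equiv track=rewrite | github.com/fedepacher/HackerRank | String Manipulation/alternating_characters.py | alternatingCharacters
-- ===== SOURCE A (Python) =====
-- def alternatingCharacters(s):
--     first_c = s[0]
--     i = 1
--     count = 0
--     while i < len(s):
--         if first_c == s[i]:
--             count += 1
--         else:
--             first_c = s[i]
--         i += 1
--     return count
-- ===== SOURCE B (Python) =====
-- def alternatingCharacters(s):
--     # Run-length decomposition: deletions = len(s) - number of runs.
--     n = len(s)
--     runs = 0
--     i = 0
--     while i < n:
--         runs += 1
--         c = s[i]
--         while i < n and s[i] == c:
--             i += 1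
--     return n - runs
-- ===== Notes on version B (the rewrite author's own statement) =====
-- stated objective: alternative
-- what changed: B decomposes the string into maximal runs of equal characters (nested run-skipping loop) and returns len(s) minus the run count, instead of A's single pairwise-comparison loop carrying the previous character and a counter; B also returns 0 on the empty string where A raises.
-- outside the precondition, e.g. on alternatingCharacters(''): A raises IndexError, B returns 0
-- crash fix: A raises IndexError on the empty string (s[0]); B naturally returns 0 there. — e.g. on alternatingCharacters(""): A raises IndexError, B returns 0
import Mathlib
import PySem

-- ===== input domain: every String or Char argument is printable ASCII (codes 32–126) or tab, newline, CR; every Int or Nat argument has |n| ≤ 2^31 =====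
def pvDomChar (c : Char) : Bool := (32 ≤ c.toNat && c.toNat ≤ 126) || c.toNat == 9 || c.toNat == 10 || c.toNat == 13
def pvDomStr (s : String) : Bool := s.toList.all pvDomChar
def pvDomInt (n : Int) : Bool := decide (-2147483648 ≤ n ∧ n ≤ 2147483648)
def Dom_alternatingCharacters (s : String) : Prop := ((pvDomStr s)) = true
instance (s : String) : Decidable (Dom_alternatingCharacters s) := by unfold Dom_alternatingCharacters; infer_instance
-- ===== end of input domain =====

-- B replaces A's pairwise-comparison loop by a run-length decomposition (len minus run count); alternative structure, same cost; B returns 0 on the empty string where A raises.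


-- ===== PORT A =====
-- while i < len(s): compare s[i] with carried first_c, bump count or replace first_c
def alternatingCharactersLoop (first_c : Char) (count : Int) : List Char → Int
  | [] => count
  | x :: xs => if first_c = x then alternatingCharactersLoop first_c (count + 1) xs
               else alternatingCharactersLoop x count xs

def alternatingCharacters (s : String) : Int :=
  match s.toList with
  | [] => 0          -- unreachable under Pre_: Python raises IndexError at s[0]
  | c :: rest => alternatingCharactersLoop c 0 rest

-- ===== PORT B =====
-- inner while: skip the rest of the current run
def skipRun (c : Char) : List Char → List Char
  | [] => []
  | x :: xs => if x = c then skipRun c xs else x :: xs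

theorem skipRun_length_le (c : Char) (l : List Char) : (skipRun c l).length ≤ l.length := by
  induction l with
  | nil => simp [skipRun]
  | cons x xs ih => simp only [skipRun]; split <;> simp <;> omega

-- outer while: count the runs
def countRuns : List Char → Int
  | [] => 0
  | x :: xs => 1 + countRuns (skipRun x xs)
termination_by l => l.length
decreasing_by
  have := skipRun_length_le x xs; simp; omega

def alternatingCharacters_alt (s : String) : Int :=
  (s.toList.length : Int) - countRuns s.toList

-- ===== PRECONDITION & SPEC =====
-- Pre_ excludes exactly the empty string, on which A raises IndexError at s[0].
def Pre_alternatingCharacters (s : String) : Prop := s ≠ ""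
instance (s : String) : Decidable (Pre_alternatingCharacters s) := by unfold Pre_alternatingCharacters; infer_instance
def pvWitness_alternatingCharacters : String := "aabba"

-- A raises IndexError on the empty string (s[0]); B naturally returns 0 there.
def Raises_alternatingCharacters (s : String) : Prop := s = ""
instance (s : String) : Decidable (Raises_alternatingCharacters s) := by unfold Raises_alternatingCharacters; infer_instance
def pvRaiseWitness_alternatingCharacters : String := ""
def pvRaiseWitnessOut_alternatingCharacters : Int := 0

def Spec_alternatingCharacters (s : String) (out : Int) : Prop := out = alternatingCharacters_alt s
instance (s : String) (out : Int) : Decidable (Spec_alternatingCharacters s out) := by unfold Spec_alternatingCharacters; infer_instance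

-- ===== CLAIM (what is proved, stated in full; the proofs are below) =====
def Claim_equal_alternatingCharacters : Prop := ∀ (s : String), Dom_alternatingCharacters s → Pre_alternatingCharacters s → Spec_alternatingCharacters s (alternatingCharacters s)
def Claim_raises_alternatingCharacters : Prop := (∀ (s : String), Dom_alternatingCharacters s → Raises_alternatingCharacters s → ¬ Pre_alternatingCharacters s) ∧ (Dom_alternatingCharacters (pvRaiseWitness_alternatingCharacters) ∧ Raises_alternatingCharacters (pvRaiseWitness_alternatingCharacters) ∧ alternatingCharacters_alt (pvRaiseWitness_alternatingCharacters) = pvRaiseWitnessOut_alternatingCharacters)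

-- ===== LEMMAS AND PROOFS =====
theorem countRuns_nil : countRuns [] = 0 := by simp only [countRuns]

theorem countRuns_cons (x : Char) (xs : List Char) :
    countRuns (x :: xs) = 1 + countRuns (skipRun x xs) := by simp only [countRuns]

theorem loop_acc (l : List Char) (c : Char) (count : Int) :
    alternatingCharactersLoop c count l = count + alternatingCharactersLoop c 0 l := by
  induction l generalizing c count with
  | nil => simp [alternatingCharactersLoop]
  | cons x xs ih =>
    simp only [alternatingCharactersLoop]
    split
    · rw [ih c (count + 1), ih c (0 + 1)]; omega
    · exact ih x count

theorem loop_runs (l : List Char) (c : Char) :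
    alternatingCharactersLoop c 0 l = (l.length : Int) - countRuns (skipRun c l) := by
  induction l generalizing c with
  | nil => simp [alternatingCharactersLoop, skipRun, countRuns_nil]
  | cons x xs ih =>
    simp only [alternatingCharactersLoop, skipRun]
    by_cases h : c = x
    · simp only [if_pos h, if_pos h.symm]
      rw [loop_acc, ih c]
      have : skipRun c xs = skipRun x xs := by rw [h]
      rw [this]
      simp; omega
    · have h' : ¬ x = c := fun e => h e.symm
      simp only [if_neg h, if_neg h']
      rw [ih x, countRuns_cons]
      simp; omega

-- ===== VERDICT (by name: the statement is the Claim_ definition above) =====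
theorem alternatingCharacters_spec : Claim_equal_alternatingCharacters := by
  intro s _ hpre
  unfold Spec_alternatingCharacters alternatingCharacters alternatingCharacters_alt
  match h : s.toList with
  | [] => exact absurd (by cases s; simpa using h) hpre
  | c :: rest =>
    show alternatingCharactersLoop c 0 rest = ((c :: rest).length : Int) - countRuns (c :: rest)
    rw [loop_runs, countRuns_cons]
    simp; omega

@[simp] theorem alternatingCharacters_raises : Claim_raises_alternatingCharacters := by
  unfold Claim_raises_alternatingCharacters
  refine ⟨fun s _ hr hp => hp hr, by decide, by decide, ?_⟩
  show ((("" : String).toList.length : Int) - countRuns ("" : String).toList) = 0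
  simp [countRuns_nil]
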